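-- pv_equiv track=rewrite | github.com/tdetry/psus-intern | gecm - python/exercises.py | exercise6
-- ===== SOURCE A (Python) =====
-- def exercise6(list, x):
--     i = 0
--     n = len(list)
--     while i<n:
--         if list[i] > x:
--             del list[i]
--             n -= 1
--         else:
--             i += 1
--     return list
-- ===== SOURCE B (Python) =====
-- def exercise6(list, x):
--     k = 0
--     for v in list:
--         if v <= x:
--             list[k] = v
--             k += 1
--     del list[k:]
--     return list
-- ===== Notes on version B (the rewrite author's own statement) =====
-- stated objective: faster
-- what changed: Replaces the while-loop with repeated in-place del (which shifts the tail on every removal) by a single-pass write-index compaction that overwrites kept elements in place and truncates the tail once, keeping the same-object mutation semantics.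
import Mathlib
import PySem

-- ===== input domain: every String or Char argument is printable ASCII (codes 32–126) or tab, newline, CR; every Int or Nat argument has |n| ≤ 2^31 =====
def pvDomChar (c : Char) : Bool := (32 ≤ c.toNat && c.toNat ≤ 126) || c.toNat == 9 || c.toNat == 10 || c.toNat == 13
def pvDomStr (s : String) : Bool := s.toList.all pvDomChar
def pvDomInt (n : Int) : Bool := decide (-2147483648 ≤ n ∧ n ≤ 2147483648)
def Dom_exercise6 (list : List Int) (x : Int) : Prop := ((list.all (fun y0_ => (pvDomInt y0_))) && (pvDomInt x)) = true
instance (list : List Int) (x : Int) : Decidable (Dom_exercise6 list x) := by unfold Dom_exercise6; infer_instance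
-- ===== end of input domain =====

-- B replaces A's repeated in-place deletions (each shifting the tail) by a single-pass
-- write-index compaction with one final truncation; return value only (both Pythons mutate
-- the argument list in place and return the same object).

-- ===== PORT A =====
-- while i < n: if list[i] > x: del list[i]; n -= 1 else: i += 1
def exA (x : Int) (lst : List Int) (i : Nat) : List Int :=
  if h : i < lst.length then
    if lst[i] > x then exA x (lst.eraseIdx i) i
    else exA x lst (i + 1)
  else lst
termination_by lst.length - i
decreasing_by
  · have := List.length_eraseIdx_of_lt h; omega
  · omega

def exercise6 (list : List Int) (x : Int) : List Int := exA x list 0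

-- ===== PORT B =====
-- k = 0; for v in list: if v <= x: list[k] = v; k += 1
-- del list[k:]; return list
def exercise6_alt (list : List Int) (x : Int) : List Int :=
  let st := list.foldl (fun (s : List Int × Nat) v => if v ≤ x then (s.1.set s.2 v, s.2 + 1) else s) (list, 0)
  st.1.take st.2

-- ===== PRECONDITION & SPEC =====
def Spec_exercise6 (list : List Int) (x : Int) (out : List Int) : Prop := out = exercise6_alt list x
instance (list : List Int) (x : Int) (out : List Int) : Decidable (Spec_exercise6 list x out) := by unfold Spec_exercise6; infer_instance

-- ===== CLAIM (what is proved, stated in full; the proofs are below) =====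
def Claim_equal_exercise6 : Prop := ∀ (list : List Int) (x : Int), Dom_exercise6 list x → Spec_exercise6 list x (exercise6 list x)

-- ===== LEMMAS AND PROOFS =====

theorem exA_eq_filter (x : Int) (lst : List Int) (i : Nat) :
    exA x lst i = lst.take i ++ (lst.drop i).filter (fun v => decide (v ≤ x)) := by
  fun_induction exA x lst i with
  | case1 lst i h hgt ih =>
    have h1 : List.take i (lst.eraseIdx i) = List.take i lst := by
      rw [List.eraseIdx_eq_take_drop_succ,
          List.take_append_of_le_length (by simp [List.length_take]; omega)]
      simp [List.take_take]
    have h2 : List.drop i (lst.eraseIdx i) = List.drop (i + 1) lst := by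
      rw [List.eraseIdx_eq_take_drop_succ,
          List.drop_append_of_le_length (by simp [List.length_take]; omega)]
      simp
    have hdrop : lst.drop i = lst[i] :: lst.drop (i + 1) := List.drop_eq_getElem_cons h
    have hx : ¬ (lst[i] ≤ x) := by omega
    rw [ih, h1, h2, hdrop, List.filter_cons]
    simp [hx]
  | case2 lst i h hle ih =>
    have hdrop : lst.drop i = lst[i] :: lst.drop (i + 1) := List.drop_eq_getElem_cons h
    have hx : lst[i] ≤ x := by omega
    have htake : List.take (i + 1) lst = List.take i lst ++ [lst[i]] := by
      rw [List.take_add_one, List.getElem?_eq_getElem h]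
      simp
    rw [ih, htake, hdrop, List.filter_cons, if_pos (by simpa using hx)]
    simp only [List.append_assoc, List.singleton_append]
  | case3 lst i h =>
    rw [List.take_of_length_le (by omega), List.drop_of_length_le (by omega)]
    simp

theorem altFold_eq (x : Int) (suffix : List Int) : ∀ (acc r : List Int), suffix.length ≤ r.length →
    ∃ r', suffix.foldl (fun (s : List Int × Nat) v => if v ≤ x then (s.1.set s.2 v, s.2 + 1) else s) (acc ++ r, acc.length)
      = (acc ++ suffix.filter (fun v => decide (v ≤ x)) ++ r',
         acc.length + (suffix.filter (fun v => decide (v ≤ x))).length) := by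
  induction suffix with
  | nil => intro acc r _; exact ⟨r, by simp⟩
  | cons v rest ih =>
    intro acc r hlen
    match r with
    | [] => simp at hlen
    | w :: r'' =>
      simp only [List.foldl_cons, List.filter_cons]
      by_cases hv : v ≤ x
      · rw [if_pos hv]
        have hset : (acc ++ w :: r'').set acc.length v = (acc ++ [v]) ++ r'' := by
          rw [List.set_append_right _ _ (le_refl _)]
          simp
        obtain ⟨r', hr'⟩ := ih (acc ++ [v]) r'' (by simpa using Nat.le_of_succ_le_succ hlen)
        refine ⟨r', ?_⟩
        have hlen1 : acc.length + 1 = (acc ++ [v]).length := by simp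
        rw [hset, hlen1, hr']
        simp [hv]
        omega
      · rw [if_neg hv]
        obtain ⟨r', hr'⟩ := ih acc (w :: r'') (by simp at hlen ⊢; omega)
        refine ⟨r', ?_⟩
        rw [hr']
        simp [hv]

-- ===== VERDICT (by name: the statement is the Claim_ definition above) =====
theorem exercise6_spec : Claim_equal_exercise6 := by
  intro list x _
  unfold Spec_exercise6 exercise6 exercise6_alt
  obtain ⟨r', hr'⟩ := altFold_eq x list [] list (le_refl _)
  simp only [List.nil_append, List.length_nil, Nat.zero_add] at hr'
  rw [exA_eq_filter, hr']
  simp
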